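-- pv_equiv track=rewrite | github.com/michael153/autociter | autociter/web/markdown.py | find_title
-- ===== SOURCE A (Python) =====
-- IGNORED_HEADERS = {"Search", "News", "Home"}
--
-- def find_title(markdown):
--     for heading_size in range(1, 7):
--         search_start = 0
--         while contains_heading(markdown, heading_size, search_start):
--             heading_start = find_heading(markdown, heading_size, search_start)
--             heading_text = get_heading_text(markdown, heading_start)
--             if heading_text not in IGNORED_HEADERS:
--                 return heading_start
--             search_start = heading_start + len(heading_text)
--     return -1
--
-- def contains_heading(markdown, size=1, start=0):
--     return find_heading(markdown, size, start) != -1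
--
-- def find_heading(markdown, size=1, start=0):
--     for index in range(start, len(markdown)):
--         desired = "\n" + "#" * size + " "
--         if markdown[index:index + len(desired)] == desired:
--             return index + len("\n")
--     return -1
--
-- def get_heading_text(markdown, heading_start=0):
--     whitespace_index = markdown.find(" ", heading_start)
--     newline_index = markdown.find("\n", whitespace_index)
--     return markdown[whitespace_index + 1:newline_index]
-- ===== SOURCE B (Python) =====
-- IGNORED_HEADERS = {"Search", "News", "Home"}
--
-- def find_title(markdown):
--     # One linear scan over newline positions, recording the earliest
--     # non-ignored heading offset per heading size, then pick the smallest size.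
--     firsts = {}
--     n = len(markdown)
--     i = markdown.find("\n")
--     while i != -1:
--         j = i + 1
--         while j < n and markdown[j] == "#":
--             j += 1
--         k = j - i - 1
--         if 1 <= k <= 6 and j < n and markdown[j] == " " and k not in firsts:
--             if markdown[j + 1:markdown.find("\n", j)] not in IGNORED_HEADERS:
--                 firsts[k] = i + 1
--         i = markdown.find("\n", i + 1)
--     for k in range(1, 7):
--         if k in firsts:
--             return firsts[k]
--     return -1
-- ===== Notes on version B (the rewrite author's own statement) =====
-- stated objective: faster
-- what changed: Replaces six whole-document searches (one per heading size, each rescanning from the top with a per-index slice comparison and a double find per step) by a single scan over newline positions that records the earliest non-ignored heading offset per size and then picks the smallest recorded size.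
import Mathlib
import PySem

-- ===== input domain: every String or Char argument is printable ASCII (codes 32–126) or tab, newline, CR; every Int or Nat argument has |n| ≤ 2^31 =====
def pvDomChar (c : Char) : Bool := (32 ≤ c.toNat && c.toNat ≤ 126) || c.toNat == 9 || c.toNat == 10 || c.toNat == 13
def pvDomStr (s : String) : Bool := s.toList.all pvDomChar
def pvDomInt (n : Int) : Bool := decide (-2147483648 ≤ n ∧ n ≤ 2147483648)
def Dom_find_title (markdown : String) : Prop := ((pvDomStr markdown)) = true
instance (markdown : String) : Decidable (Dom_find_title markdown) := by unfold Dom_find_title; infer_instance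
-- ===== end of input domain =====

-- B replaces A's six per-size document searches by one linear scan over newline
-- positions recording the earliest non-ignored heading per size (measurably faster, same results).


-- IGNORED_HEADERS = {"Search", "News", "Home"} (shared module constant)
def pvIGN : List (List Char) := [String.toList "Search", String.toList "News", String.toList "Home"]

-- ===== PORT A =====

-- desired = "\n" + "#" * size + " "
def pvDesired (size : Int) : List Char := '\n' :: (List.replicate size.toNat '#' ++ [' '])

-- find_heading's for-loop: first index whose slice equals desired, returning index + 1
def pvFindHeadGo (cs : List Char) (size : Int) : List Int → Int
  | [] => -1
  | i :: rest =>
      let desired := pvDesired size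
      if PySem.List.slice cs (some i) (some (i + (desired.length : Int))) = desired then i + 1
      else pvFindHeadGo cs size rest

def pvFindHeading (cs : List Char) (size start : Int) : Int :=
  pvFindHeadGo cs size (PySem.List.pyRange start (cs.length : Int) 1)

def pvContainsHeading (cs : List Char) (size start : Int) : Bool :=
  pvFindHeading cs size start != -1

-- get_heading_text
def pvHeadingText (cs : List Char) (hstart : Int) : List Char :=
  let ws := PySem.Chars.findFrom cs [' '] hstart none
  let nl := PySem.Chars.findFrom cs ['\n'] ws none
  PySem.List.slice cs (some (ws + 1)) (some nl)

-- the while-loop of find_title for one heading size; fuel ≥ len+1 suffices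
-- (search_start strictly increases each iteration), none = loop condition became false
def pvWhileA (cs : List Char) (size : Int) : Nat → Int → Option Int
  | 0, _ => none
  | fuel+1, start =>
      if pvContainsHeading cs size start then
        let hs := pvFindHeading cs size start
        let text := pvHeadingText cs hs
        if text ∈ pvIGN then pvWhileA cs size fuel (hs + (text.length : Int))
        else some hs
      else none

-- for heading_size in range(1, 7)
def pvForSizes (cs : List Char) : List Int → Int
  | [] => -1
  | k :: rest =>
      match pvWhileA cs k (cs.length + 1) 0 with
      | some v => v
      | none => pvForSizes cs rest

def find_title (markdown : String) : Int :=
  pvForSizes markdown.toList (PySem.List.pyRange 1 7 1)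

-- ===== PORT B =====

-- inner while: advance j past the run of '#'
def pvRunEnd (cs : List Char) (j : Nat) : Nat :=
  if h : j < cs.length then (if cs[j] = '#' then pvRunEnd cs (j+1) else j) else j
termination_by cs.length - j

-- outer while over newline positions i (i = -1 ends); fuel ≥ len+1 suffices
def pvLoopB (cs : List Char) : Nat → PySem.Dict Int Int → Int → PySem.Dict Int Int
  | 0, firsts, _ => firsts
  | fuel+1, firsts, i =>
      if i = -1 then firsts
      else
        let j := pvRunEnd cs (i.toNat + 1)
        let k : Int := (j : Int) - i - 1
        let firsts' :=
          if 1 ≤ k ∧ k ≤ 6 ∧ j < cs.length ∧ cs[j]? = some ' ' ∧ firsts.contains k = false then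
            (if PySem.List.slice cs (some ((j : Int) + 1))
                  (some (PySem.Chars.findFrom cs ['\n'] (j : Int) none)) ∈ pvIGN then firsts
             else firsts.insert k (i + 1))
          else firsts
        pvLoopB cs fuel firsts' (PySem.Chars.findFrom cs ['\n'] (i + 1) none)

-- for k in range(1, 7): if k in firsts: return firsts[k]
def pvPick (firsts : PySem.Dict Int Int) : List Int → Int
  | [] => -1
  | k :: rest =>
      match firsts.get? k with
      | some v => v
      | none => pvPick firsts rest

def find_title_alt (markdown : String) : Int :=
  let cs := markdown.toList
  let firsts := pvLoopB cs (cs.length + 1) PySem.Dict.empty (PySem.Chars.find cs ['\n'])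
  pvPick firsts (PySem.List.pyRange 1 7 1)

-- ===== PRECONDITION & SPEC =====
def Spec_find_title (markdown : String) (out : Int) : Prop := out = find_title_alt markdown
instance (markdown : String) (out : Int) : Decidable (Spec_find_title markdown out) := by unfold Spec_find_title; infer_instance

-- ===== CLAIM (what is proved, stated in full; the proofs are below) =====
def Claim_equal_find_title : Prop := ∀ (markdown : String), Dom_find_title markdown → Spec_find_title markdown (find_title markdown)

-- ===== LEMMAS AND PROOFS =====

-- generic "first index ≥ t satisfying p" search, the common spec of both programs' scans
def pvFirst (cs : List Char) (p : Nat → Bool) (t : Nat) : Option Nat :=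
  if t < cs.length then (if p t then some t else pvFirst cs p (t+1)) else none
termination_by cs.length - t

def pvOcc (cs : List Char) (k : Nat) (i : Nat) : Bool :=
  decide (pvDesired (k : Int) <+: cs.drop i)

def pvGood (cs : List Char) (i : Nat) : Bool :=
  decide (pvHeadingText cs ((i : Int) + 1) ∉ pvIGN)

def pvOG (cs : List Char) (k : Nat) (i : Nat) : Bool := pvOcc cs k i && pvGood cs i

def pvIsNl (cs : List Char) (i : Nat) : Bool := cs[i]? == some '\n'

-- pvFirst characterizations
theorem pvFirst_eq_some_iff (cs : List Char) (p : Nat → Bool) (t i : Nat) :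
    pvFirst cs p t = some i ↔
      (t ≤ i ∧ i < cs.length ∧ p i = true ∧ ∀ j, t ≤ j → j < i → p j = false) := by
  fun_induction pvFirst cs p t with
  | case1 t h hp =>
    simp only [Option.some_inj]
    constructor
    · rintro rfl; exact ⟨le_refl _, h, hp, fun j h1 h2 => absurd h1 (by omega)⟩
    · rintro ⟨h1, h2, h3, h4⟩
      by_contra hne
      have := h4 t (le_refl _) (by omega)
      simp [hp] at this
  | case2 t h hp ih =>
    rw [ih]
    constructor
    · rintro ⟨h1, h2, h3, h4⟩
      refine ⟨by omega, h2, h3, fun j hj1 hj2 => ?_⟩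
      rcases Nat.eq_or_lt_of_le hj1 with rfl | hlt
      · simpa using hp
      · exact h4 j hlt hj2
    · rintro ⟨h1, h2, h3, h4⟩
      have hti : t ≠ i := by rintro rfl; simp [hp] at h3
      exact ⟨by omega, h2, h3, fun j hj1 hj2 => h4 j (by omega) hj2⟩
  | case3 t h =>
    simp only [(by simp : (none : Option Nat) = some i ↔ False), false_iff]
    rintro ⟨h1, h2, h3, h4⟩
    omega

theorem pvFirst_eq_none_iff (cs : List Char) (p : Nat → Bool) (t : Nat) :
    pvFirst cs p t = none ↔ ∀ j, t ≤ j → j < cs.length → p j = false := by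
  fun_induction pvFirst cs p t with
  | case1 t h hp =>
    simp only [(by simp : (some t : Option Nat) = none ↔ False), false_iff]
    intro hall
    have := hall t (le_refl _) h
    simp [hp] at this
  | case2 t h hp ih =>
    rw [ih]
    constructor
    · intro h4 j hj1 hj2
      rcases Nat.eq_or_lt_of_le hj1 with rfl | hlt
      · simpa using hp
      · exact h4 j hlt hj2
    · intro h4 j hj1 hj2; exact h4 j (by omega) hj2
  | case3 t h =>
    simp only [true_iff]
    intro j h1 h2; omega

theorem pvFirst_congr (cs : List Char) (p : Nat → Bool) (t t' : Nat) (h : t ≤ t')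
    (hno : ∀ j, t ≤ j → j < t' → p j = false) : pvFirst cs p t = pvFirst cs p t' := by
  cases he : pvFirst cs p t' with
  | none =>
    rw [pvFirst_eq_none_iff] at he ⊢
    intro j h1 h2
    by_cases hj : j < t'
    · exact hno j h1 hj
    · exact he j (by omega) h2
  | some i =>
    rw [pvFirst_eq_some_iff] at he ⊢
    obtain ⟨h1, h2, h3, h4⟩ := he
    refine ⟨by omega, h2, h3, fun j hj1 hj2 => ?_⟩
    by_cases hj : j < t'
    · exact hno j hj1 hj
    · exact h4 j (by omega) hj2

theorem pvFirst_none_mono (cs : List Char) (p q : Nat → Bool) (t : Nat)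
    (himp : ∀ j, p j = true → q j = true) (h : pvFirst cs q t = none) :
    pvFirst cs p t = none := by
  rw [pvFirst_eq_none_iff] at h ⊢
  intro j h1 h2
  by_contra hp
  have := himp j (by simpa using hp)
  rw [h j h1 h2] at this; simp at this

-- single-character find bridge
theorem pvSingle_prefix (l : List Char) (j : Nat) (c : Char) :
    [c] <+: l.drop j ↔ l[j]? = some c := by
  rw [← List.head?_drop]
  cases hd : l.drop j with
  | nil => simp [List.prefix_iff_eq_take]
  | cons a as => simp [List.prefix_iff_eq_take, eq_comm]

theorem pvFindFrom_single (cs : List Char) (c : Char) (t : Nat) (ht : t ≤ cs.length) :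
    PySem.Chars.findFrom cs [c] (t : Int) none =
      (match pvFirst cs (fun j => cs[j]? == some c) t with
       | none => -1
       | some i => (i : Int)) := by
  rw [PySem.Chars.findFrom_natCast cs [c] t ht]
  cases he : pvFirst cs (fun j => cs[j]? == some c) t with
  | none =>
    rw [pvFirst_eq_none_iff] at he
    have hni : ¬ ([c] <:+: cs.drop t) := by
      intro hin
      have hIn : PySem.Chars.isIn [c] (cs.drop t) = true := (PySem.Chars.isIn_iff_infix [c] (cs.drop t)).mpr hin
      obtain ⟨j, hj⟩ := (PySem.Chars.exists_prefix_drop_iff_isIn [c] (cs.drop t)).mpr hIn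
      rw [List.drop_drop, pvSingle_prefix] at hj
      have hlt : t + j < cs.length := (List.getElem?_eq_some_iff.mp hj).1
      have := he (t + j) (by omega) hlt
      simp [hj] at this
    rw [(PySem.Chars.find_eq_neg_one_iff (cs.drop t) [c]).mpr hni]
    simp
  | some i =>
    rw [pvFirst_eq_some_iff] at he
    obtain ⟨h1, h2, h3, h4⟩ := he
    simp only [beq_iff_eq] at h3
    have hpre : [c] <+: (cs.drop t).drop (i - t) := by
      rw [List.drop_drop, pvSingle_prefix, Nat.add_sub_cancel' h1]
      exact h3
    have hinf : [c] <:+: cs.drop t :=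
      (PySem.Chars.isIn_iff_infix [c] (cs.drop t)).mp
        ((PySem.Chars.exists_prefix_drop_iff_isIn [c] (cs.drop t)).mp ⟨i - t, hpre⟩)
    have hnn : 0 ≤ PySem.Chars.find (cs.drop t) [c] :=
      (PySem.Chars.find_nonneg_iff (cs.drop t) [c]).mpr hinf
    obtain ⟨hp, hmin⟩ := PySem.Chars.find_spec hnn
    set f := (PySem.Chars.find (cs.drop t) [c]).toNat with hf
    rw [List.drop_drop, pvSingle_prefix] at hp
    have hge : i ≤ t + f := by
      by_contra hlt
      have := h4 (t + f) (by omega) (by omega)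
      simp [hp] at this
    have hle : ¬ (i - t < f) := by
      intro hgt
      exact hmin (i - t) (by omega) hpre
    have hfe : f = i - t := by omega
    have hne : PySem.Chars.find (cs.drop t) [c] ≠ -1 := by omega
    simp only [if_neg hne]
    omega

-- pointwise characterization of a size-k heading occurrence at i
theorem pvDesired_getElem (k m : Nat) :
    (pvDesired (k : Int))[m]? =
      (if m = 0 then some '\n' else if m < k + 1 then some '#'
       else if m = k + 1 then some ' ' else none) := by
  unfold pvDesired
  rw [Int.toNat_natCast]
  cases m with
  | zero => simp
  | succ m =>
    simp only [List.getElem?_cons_succ, List.getElem?_append, List.getElem?_replicate,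
      List.length_replicate]
    by_cases h : m < k
    · rw [if_pos h, if_pos h, if_neg (by omega), if_pos (by omega)]
    · by_cases h2 : m = k
      · subst h2
        simp
      · have h4 : ¬ (m + 1 < k + 1) := by omega
        have h5 : ¬ (m + 1 = k + 1) := by omega
        have h3 : m - k = (m - k - 1) + 1 := by omega
        rw [if_neg h, if_neg (by omega : ¬ (m + 1 = 0)), if_neg h4, if_neg h5, h3]
        simp
theorem pvOcc_iff (cs : List Char) (k i : Nat) :
    pvOcc cs k i = true ↔
      (cs[i]? = some '\n' ∧ (∀ d, d < k → cs[i+1+d]? = some '#') ∧ cs[i+1+k]? = some ' ') := by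
  unfold pvOcc
  rw [decide_eq_true_iff, List.prefix_iff_eq_take]
  have hlen : (pvDesired (k : Int)).length = k + 2 := by simp [pvDesired]
  rw [hlen]
  have hrhs : ∀ m : Nat, ((cs.drop i).take (k+2))[m]? = if m < k + 2 then cs[i+m]? else none := by
    intro m
    rw [List.getElem?_take]
    split
    · rw [List.getElem?_drop]
    · rfl
  constructor
  · intro h
    have hm : ∀ m : Nat, (pvDesired (k : Int))[m]? = if m < k + 2 then cs[i+m]? else none := by
      intro m; rw [h, hrhs]
    refine ⟨?_, ?_, ?_⟩
    · have h0 := hm 0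
      rw [pvDesired_getElem, if_pos rfl, if_pos (by omega : (0:Nat) < k+2)] at h0
      simpa using h0.symm
    · intro d hd
      have hx := hm (1 + d)
      rw [pvDesired_getElem, if_neg (by omega), if_pos (by omega), if_pos (by omega)] at hx
      rw [(by omega : i + 1 + d = i + (1 + d))]
      exact hx.symm
    · have hx := hm (k + 1)
      rw [pvDesired_getElem, if_neg (by omega), if_neg (by omega), if_pos rfl,
        if_pos (by omega)] at hx
      rw [(by omega : i + 1 + k = i + (k + 1))]
      exact hx.symm
  · rintro ⟨h0, hh, hs⟩
    apply List.ext_getElem?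
    intro m
    rw [pvDesired_getElem, hrhs]
    by_cases hm0 : m = 0
    · subst hm0
      rw [if_pos rfl, if_pos (by omega)]
      simpa using h0.symm
    · by_cases hmk : m < k + 1
      · have hx := hh (m - 1) (by omega)
        rw [(by omega : i + 1 + (m - 1) = i + m)] at hx
        rw [if_neg hm0, if_pos hmk, if_pos (by omega)]
        exact hx.symm
      · by_cases hmk1 : m = k + 1
        · subst hmk1
          rw [(by omega : i + 1 + k = i + (k + 1))] at hs
          rw [if_neg hm0, if_neg hmk, if_pos rfl, if_pos (by omega)]
          exact hs.symm
        · rw [if_neg hm0, if_neg hmk, if_neg hmk1, if_neg (by omega)]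

theorem pvOcc_lt (cs : List Char) (k i : Nat) (h : pvOcc cs k i = true) :
    i + 1 + k < cs.length := by
  have := ((pvOcc_iff cs k i).mp h).2.2
  exact (List.getElem?_eq_some_iff.mp this).1

theorem pvOcc_nl (cs : List Char) (k i : Nat) (h : pvOcc cs k i = true) :
    cs[i]? = some '\n' := ((pvOcc_iff cs k i).mp h).1

-- runEnd characterization
theorem pvRunEnd_spec (cs : List Char) (m : Nat) :
    m ≤ pvRunEnd cs m ∧ (∀ u, m ≤ u → u < pvRunEnd cs m → cs[u]? = some '#') ∧
      (pvRunEnd cs m < cs.length → cs[pvRunEnd cs m]? ≠ some '#') ∧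
      (m ≤ cs.length → pvRunEnd cs m ≤ cs.length) := by
  fun_induction pvRunEnd cs m with
  | case1 m h hc ih =>
    obtain ⟨ih1, ih2, ih3, ih4⟩ := ih
    refine ⟨by omega, fun u hu1 hu2 => ?_, ih3, fun _ => ih4 (by omega)⟩
    rcases Nat.eq_or_lt_of_le hu1 with rfl | hlt
    · rw [List.getElem?_eq_getElem h, hc]
    · exact ih2 u hlt hu2
  | case2 m h hc =>
    refine ⟨le_refl _, fun u hu1 hu2 => by omega, fun hlt => ?_, fun hle => hle⟩
    rw [List.getElem?_eq_getElem h]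
    intro hcon
    exact hc (by simpa using hcon)
  | case3 m h =>
    refine ⟨le_refl _, fun u hu1 hu2 => by omega, fun hlt => by omega, fun hle => hle⟩

theorem pvRunEnd_eq (cs : List Char) (m k : Nat)
    (h1 : ∀ d, d < k → cs[m+d]? = some '#') (h2 : cs[m+k]? = some ' ') :
    pvRunEnd cs m = m + k := by
  obtain ⟨s1, s2, s3, s4⟩ := pvRunEnd_spec cs m
  have hklen : m + k < cs.length := (List.getElem?_eq_some_iff.mp h2).1
  by_cases hlt : pvRunEnd cs m < m + k
  · exfalso
    have := h1 (pvRunEnd cs m - m) (by omega)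
    rw [(by omega : m + (pvRunEnd cs m - m) = pvRunEnd cs m)] at this
    exact s3 (by omega) this
  · by_cases hgt : m + k < pvRunEnd cs m
    · exfalso
      have := s2 (m + k) (by omega) hgt
      rw [h2] at this
      simp at this
    · omega

-- A's ws-search lands right after the '#' run, so both programs compute the same text
theorem pvText_eq (cs : List Char) (k i : Nat) (hocc : pvOcc cs k i = true) :
    pvHeadingText cs ((i : Int) + 1) =
      PySem.List.slice cs (some (((i+1+k : Nat) : Int) + 1))
        (some (PySem.Chars.findFrom cs ['\n'] ((i+1+k : Nat) : Int) none)) := by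
  obtain ⟨h0, hh, hs⟩ := (pvOcc_iff cs k i).mp hocc
  have hlen : i + 1 + k < cs.length := pvOcc_lt cs k i hocc
  have hws : PySem.Chars.findFrom cs [' '] ((i+1 : Nat) : Int) none = ((i+1+k : Nat) : Int) := by
    rw [pvFindFrom_single cs ' ' (i+1) (by omega)]
    have hfs : pvFirst cs (fun j => cs[j]? == some ' ') (i+1) = some (i+1+k) := by
      rw [pvFirst_eq_some_iff]
      refine ⟨by omega, hlen, by simp [hs], fun j hj1 hj2 => ?_⟩
      have hj := hh (j - (i+1)) (by omega)
      rw [(by omega : i + 1 + (j - (i+1)) = j)] at hj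
      simp [hj]
    rw [hfs]
  have hcast : ((i : Int) + 1) = ((i+1 : Nat) : Int) := by push_cast; ring
  simp only [pvHeadingText]
  rw [hcast, hws]

-- after an ignored heading at i, A's new search start skips no occurrence
theorem pvSkip (cs : List Char) (k i : Nat) (hocc : pvOcc cs k i = true) :
    ∀ j, i + 1 ≤ j →
      j < ((i : Int) + 1 + ((pvHeadingText cs ((i : Int) + 1)).length : Int)).toNat →
      pvOcc cs k j = false := by
  obtain ⟨h0, hh, hs⟩ := (pvOcc_iff cs k i).mp hocc
  have hlen : i + 1 + k < cs.length := pvOcc_lt cs k i hocc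
  rw [pvText_eq cs k i hocc]
  intro j hj1 hj2
  by_cases hjw : j ≤ i + 1 + k
  · -- j is inside '\n' #^k ' ' : not a newline there
    by_contra hocc'
    have hnl := pvOcc_nl cs k j (by simpa using hocc')
    rcases Nat.lt_or_ge j (i + 1 + k) with hlt | hge
    · have hj := hh (j - (i+1)) (by omega)
      rw [(by omega : i + 1 + (j - (i+1)) = j)] at hj
      rw [hj] at hnl
      simp at hnl
    · have hje : j = i + 1 + k := by omega
      rw [hje, hs] at hnl
      simp at hnl
  · -- j is after the space and before the terminating newline (if any)
    cases hq : pvFirst cs (fun u => cs[u]? == some '\n') (i+1+k) with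
    | none =>
      by_contra hocc'
      have hnl := pvOcc_nl cs k j (by simpa using hocc')
      rw [pvFirst_eq_none_iff] at hq
      have hjn : j < cs.length := by
        have := pvOcc_lt cs k j (by simpa using hocc')
        omega
      have := hq j (by omega) hjn
      simp [hnl] at this
    | some q =>
      rw [pvFindFrom_single cs '\n' (i+1+k) (by omega)] at hj2
      rw [hq] at hj2
      rw [pvFirst_eq_some_iff] at hq
      obtain ⟨hq1, hq2, hq3, hq4⟩ := hq
      have hqne : q ≠ i + 1 + k := by
        intro he
        rw [he, hs] at hq3
        simp at hq3
      -- text = slice cs (i+k+2) q, its length is q - (i+k+2)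
      have hslice : PySem.List.slice cs (some (((i+1+k : Nat) : Int) + 1)) (some ((q : Nat) : Int)) =
          (cs.drop (i+1+k+1)).take (q - (i+1+k+1)) := by
        rw [(by push_cast; ring : ((i+1+k : Nat) : Int) + 1 = ((i+1+k+1 : Nat) : Int)),
          PySem.List.slice_natCast]
      rw [hslice] at hj2
      have htl : ((cs.drop (i+1+k+1)).take (q - (i+1+k+1))).length = q - (i+1+k+1) := by
        simp
        omega
      rw [htl] at hj2
      have hjq : j < q := by omega
      by_contra hocc'
      have hnl := pvOcc_nl cs k j (by simpa using hocc')
      have := hq4 j (by omega) hjq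
      simp [hnl] at this

-- find_heading = pvFirst of occurrences
theorem pvFindHeading_eq (cs : List Char) (k : Nat) (t : Int) (ht : 0 ≤ t) :
    pvFindHeading cs (k : Int) t =
      (match pvFirst cs (pvOcc cs k) t.toNat with
       | none => -1
       | some i => (i : Int) + 1) := by
  have hgen : ∀ d (t : Int), 0 ≤ t → cs.length - t.toNat = d →
      pvFindHeading cs (k : Int) t =
        (match pvFirst cs (pvOcc cs k) t.toNat with
         | none => -1
         | some i => (i : Int) + 1) := by
    intro d
    induction d with
    | zero =>
      intro t ht hd
      have hge : (cs.length : Int) ≤ t := by omega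
      unfold pvFindHeading
      rw [PySem.List.pyRange_one_eq_nil hge]
      have hnone : pvFirst cs (pvOcc cs k) t.toNat = none := by
        rw [pvFirst_eq_none_iff]
        intro j h1 h2
        omega
      rw [hnone]
      rfl
    | succ d ih =>
      intro t ht hd
      have hlt : t < (cs.length : Int) := by omega
      unfold pvFindHeading
      rw [PySem.List.pyRange_one_cons hlt]
      show (if PySem.List.slice cs (some t) (some (t + ((pvDesired (k:Int)).length : Int))) =
              pvDesired (k:Int) then t + 1
            else pvFindHeadGo cs (k : Int) (PySem.List.pyRange (t+1) (cs.length : Int) 1)) = _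
      have htn : t = ((t.toNat : Nat) : Int) := by omega
      have hsl : PySem.List.slice cs (some t) (some (t + ((pvDesired (k:Int)).length : Int))) =
          (cs.drop t.toNat).take (pvDesired (k:Int)).length := by
        rw [htn, PySem.List.slice_natCast_add]
        rw [Int.toNat_natCast]
      rw [hsl]
      by_cases hocc : pvOcc cs k t.toNat
      · have hpre : pvDesired (k:Int) <+: cs.drop t.toNat := by
          have := hocc
          unfold pvOcc at this
          simpa using this
        rw [if_pos (by rw [List.prefix_iff_eq_take] at hpre; exact hpre.symm)]
        have hsome : pvFirst cs (pvOcc cs k) t.toNat = some t.toNat := by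
          rw [pvFirst_eq_some_iff]
          exact ⟨le_refl _, by omega, hocc, fun j h1 h2 => by omega⟩
        rw [hsome]
        simp
        omega
      · have hnocc : ¬ ((cs.drop t.toNat).take (pvDesired (k:Int)).length = pvDesired (k:Int)) := by
          intro he
          apply hocc
          unfold pvOcc
          rw [decide_eq_true_iff, List.prefix_iff_eq_take]
          exact he.symm
        rw [if_neg hnocc]
        have hrec : pvFindHeadGo cs (k : Int) (PySem.List.pyRange (t+1) (cs.length : Int) 1) =
            pvFindHeading cs (k : Int) (t+1) := rfl
        rw [hrec, ih (t+1) (by omega) (by omega)]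
        have hstep : pvFirst cs (pvOcc cs k) t.toNat = pvFirst cs (pvOcc cs k) (t+1).toNat := by
          apply pvFirst_congr
          · omega
          · intro j h1 h2
            have hj : j = t.toNat := by omega
            rw [hj]
            simpa using hocc
        rw [hstep]
  exact hgen (cs.length - t.toNat) t ht rfl

-- the while loop of A for size k = first good occurrence
theorem pvWhileA_eq (cs : List Char) (k : Nat) (fuel : Nat) (t : Int) (ht : 0 ≤ t)
    (hfuel : cs.length + 1 - t.toNat ≤ fuel) :
    pvWhileA cs (k : Int) fuel t =
      (pvFirst cs (pvOG cs k) t.toNat).map (fun i => (i : Int) + 1) := by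
  induction fuel generalizing t with
  | zero =>
    have hnone : pvFirst cs (pvOG cs k) t.toNat = none := by
      rw [pvFirst_eq_none_iff]
      intro j h1 h2
      omega
    rw [hnone]
    rfl
  | succ fuel ih =>
    show (if pvContainsHeading cs (k : Int) t then _ else _) = _
    unfold pvContainsHeading
    rw [pvFindHeading_eq cs k t ht]
    cases hf : pvFirst cs (pvOcc cs k) t.toNat with
    | none =>
      have hog : pvFirst cs (pvOG cs k) t.toNat = none := by
        apply pvFirst_none_mono cs _ (pvOcc cs k) _ _ hf
        intro j hj
        unfold pvOG at hj
        exact (Bool.and_eq_true_iff.mp hj).1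
      rw [hog]
      simp
    | some i =>
      rw [pvFirst_eq_some_iff] at hf
      obtain ⟨h1, h2, h3, h4⟩ := hf
      have hred : (match (some i : Option Nat) with
          | none => (-1 : Int) | some j => (j : Int) + 1) = (i : Int) + 1 := rfl
      rw [hred]
      have hne : ((i : Int) + 1 != -1) = true := by
        simp only [bne_iff_ne, ne_eq]
        omega
      rw [if_pos hne]
      show (if pvHeadingText cs ((i : Int) + 1) ∈ pvIGN then
              pvWhileA cs (k : Int) fuel
                (((i : Int) + 1) + ((pvHeadingText cs ((i : Int) + 1)).length : Int))
            else some ((i : Int) + 1)) = _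
      by_cases hg : pvGood cs i = true
      · -- text not ignored: both return i + 1
        have hnotin : pvHeadingText cs ((i : Int) + 1) ∉ pvIGN := by
          unfold pvGood at hg
          simpa using hg
        rw [if_neg hnotin]
        have hog : pvFirst cs (pvOG cs k) t.toNat = some i := by
          rw [pvFirst_eq_some_iff]
          refine ⟨h1, h2, by unfold pvOG; rw [h3, hg]; rfl, fun j hj1 hj2 => ?_⟩
          unfold pvOG
          rw [h4 j hj1 hj2]
          rfl
        rw [hog]
        rfl
      · -- ignored: A advances to hs + len(text); nothing is skipped
        have hin : pvHeadingText cs ((i : Int) + 1) ∈ pvIGN := by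
          unfold pvGood at hg
          simpa using hg
        rw [if_pos hin]
        set m : Int := (i : Int) + 1 + ((pvHeadingText cs ((i : Int) + 1)).length : Int) with hm
        have hm0 : 0 ≤ m := by omega
        have hmge : i + 1 ≤ m.toNat := by omega
        rw [ih m hm0 (by omega)]
        have hchain1 : pvFirst cs (pvOG cs k) t.toNat = pvFirst cs (pvOG cs k) (i+1) := by
          apply pvFirst_congr cs _ _ _ (by omega)
          intro j hj1 hj2
          by_cases hji : j = i
          · subst hji
            have hgf : pvGood cs j = false := by simpa using hg
            unfold pvOG
            simp [hgf]
          · unfold pvOG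
            rw [h4 j hj1 (by omega)]
            rfl
        have hchain2 : pvFirst cs (pvOG cs k) (i+1) = pvFirst cs (pvOG cs k) m.toNat := by
          apply pvFirst_congr cs _ _ _ hmge
          intro j hj1 hj2
          have := pvSkip cs k i h3 j hj1 (by omega)
          unfold pvOG
          rw [this]
          rfl
        rw [hchain1, hchain2]

-- the loop of B records, for each admissible size, the first good occurrence
theorem pvLoopB_eq (cs : List Char) (fuel : Nat) (t : Nat) (d : PySem.Dict Int Int)
    (htn : t ≤ cs.length) (hfuel : cs.length + 1 - t ≤ fuel) (k : Nat) (hk1 : 1 ≤ k) (hk6 : k ≤ 6) :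
    (pvLoopB cs fuel d
        (match pvFirst cs (pvIsNl cs) t with | none => -1 | some i => (i : Int))).get? (k : Int) =
      (d.get? (k : Int)).or ((pvFirst cs (pvOG cs k) t).map (fun i => (i : Int) + 1)) := by
  induction fuel generalizing t d with
  | zero => omega
  | succ fuel ih =>
    cases hnl : pvFirst cs (pvIsNl cs) t with
    | none =>
      -- no further newline: loop exits, and no further occurrence exists
      show (pvLoopB cs (fuel+1) d (-1)).get? (k : Int) = _
      have hog : pvFirst cs (pvOG cs k) t = none := by
        apply pvFirst_none_mono cs _ (pvIsNl cs) _ _ hnl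
        intro j hj
        unfold pvOG at hj
        have hocc := (Bool.and_eq_true_iff.mp hj).1
        unfold pvIsNl
        simp [pvOcc_nl cs k j hocc]
      rw [hog]
      show (pvLoopB cs (fuel+1) d (-1)).get? (k : Int) = (d.get? (k : Int)).or none
      rw [Option.or_none]
      show (if (-1 : Int) = -1 then d else _).get? (k : Int) = d.get? (k : Int)
      rw [if_pos rfl]
    | some i0 =>
      rw [pvFirst_eq_some_iff] at hnl
      obtain ⟨hn1, hn2, hn3, hn4⟩ := hnl
      have hnl3 : cs[i0]? = some '\n' := by
        unfold pvIsNl at hn3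
        simpa using hn3
      have hnl4 : ∀ j, t ≤ j → j < i0 → cs[j]? ≠ some '\n' := by
        intro j h1 h2 hc
        have := hn4 j h1 h2
        unfold pvIsNl at this
        simp [hc] at this
      have hnocclt : ∀ j, t ≤ j → j < i0 → pvOcc cs k j = false := by
        intro j h1 h2
        rw [Bool.eq_false_iff]
        intro hc
        exact hnl4 j h1 h2 (pvOcc_nl cs k j hc)
      show (pvLoopB cs (fuel+1) d ((i0 : Nat) : Int)).get? (k : Int) = _
      have hne : ¬ (((i0 : Nat) : Int) = -1) := by omega
      -- unfold one loop iteration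
      rw [pvLoopB]
      rw [if_neg hne]
      simp only [Int.toNat_natCast]
      set j := pvRunEnd cs (i0 + 1) with hj
      obtain ⟨hr1, hr2, hr3, _⟩ := pvRunEnd_spec cs (i0 + 1)
      rw [← hj] at hr1 hr2 hr3
      set r : Nat := j - (i0 + 1) with hrdef
      have hjr : j = i0 + 1 + r := by omega
      have hkint : ((j : Int) - (i0 : Int) - 1) = ((r : Nat) : Int) := by omega
      -- the next loop entry is the next newline
      have hnext : PySem.Chars.findFrom cs ['\n'] (((i0 : Nat) : Int) + 1) none =
          (match pvFirst cs (pvIsNl cs) (i0 + 1) with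
           | none => -1
           | some i => ((i : Nat) : Int)) := by
        rw [(by push_cast; ring : ((i0 : Nat) : Int) + 1 = ((i0 + 1 : Nat) : Int)),
          pvFindFrom_single cs '\n' (i0+1) (by omega)]
        rfl
      rw [hkint, hnext]
      by_cases hko : pvOcc cs k i0 = true
      · -- a size-k heading starts at this newline
        obtain ⟨hc0, hch, hcs⟩ := (pvOcc_iff cs k i0).mp hko
        have hklen : i0 + 1 + k < cs.length := pvOcc_lt cs k i0 hko
        have hreq : j = i0 + 1 + k := by
          rw [hj]
          apply pvRunEnd_eq cs (i0+1) k
          · intro dd hdd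
            exact hch dd hdd
          · exact hcs
        have hrk : r = k := by omega
        rw [hrk]
        have hjlt : j < cs.length := by omega
        have hjsp : cs[j]? = some ' ' := by rw [hreq]; exact hcs
        -- B's text is A's text
        have htext : PySem.List.slice cs (some ((j : Int) + 1))
            (some (PySem.Chars.findFrom cs ['\n'] (j : Int) none)) =
            pvHeadingText cs ((i0 : Int) + 1) := by
          rw [pvText_eq cs k i0 hko, hreq]
        by_cases hcont : d.contains ((k : Nat) : Int) = true
        · -- size k already recorded: guard fails, lookup short-circuits
          rw [if_neg (by simp [hcont])]
          rw [ih (i0+1) d (by omega) (by omega)]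
          have hsome : (d.get? ((k : Nat) : Int)).isSome = true := by
            rw [← PySem.Dict.contains_eq_isSome_get? d ((k : Nat) : Int)]
            exact hcont
          obtain ⟨v, hv⟩ := Option.isSome_iff_exists.mp hsome
          rw [hv, Option.some_or, Option.some_or]
        · have hcontf : d.contains ((k : Nat) : Int) = false := by
            rw [Bool.eq_false_iff]; exact hcont
          have hdnone : d.get? ((k : Nat) : Int) = none := by
            have := PySem.Dict.contains_eq_isSome_get? d ((k : Nat) : Int)
            rw [hcontf] at this
            cases hg : d.get? ((k : Nat) : Int) with
            | none => rfl
            | some v => rw [hg] at this; simp at this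
          by_cases hgood : pvGood cs i0 = true
          · -- record it: both sides are some (i0 + 1)
            have hnotin : pvHeadingText cs ((i0 : Int) + 1) ∉ pvIGN := by
              unfold pvGood at hgood
              simpa using hgood
            rw [if_pos ⟨by omega, by omega, hjlt, hjsp, hcontf⟩]
            rw [htext, if_neg hnotin]
            rw [ih (i0+1) _ (by omega) (by omega)]
            rw [PySem.Dict.get?_insert_self]
            have hog : pvFirst cs (pvOG cs k) t = some i0 := by
              rw [pvFirst_eq_some_iff]
              refine ⟨hn1, hn2, by unfold pvOG; rw [hko, hgood]; rfl, fun u hu1 hu2 => ?_⟩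
              unfold pvOG
              rw [hnocclt u hu1 hu2]
              rfl
            rw [hog, hdnone]
            rfl
          · -- ignored: skip; first good occurrence is after i0
            have hin : pvHeadingText cs ((i0 : Int) + 1) ∈ pvIGN := by
              unfold pvGood at hgood
              simpa using hgood
            rw [if_pos ⟨by omega, by omega, hjlt, hjsp, hcontf⟩]
            rw [htext, if_pos hin]
            rw [ih (i0+1) d (by omega) (by omega)]
            have hchain : pvFirst cs (pvOG cs k) t = pvFirst cs (pvOG cs k) (i0+1) := by
              apply pvFirst_congr cs _ _ _ (by omega)
              intro u hu1 hu2
              by_cases hui : u = i0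
              · subst hui
                have hgf : pvGood cs u = false := by simpa using hgood
                unfold pvOG
                simp [hgf]
              · unfold pvOG
                rw [hnocclt u hu1 (by omega)]
                rfl
            rw [hchain]
      · -- no size-k heading here: key k is untouched this iteration
        have hchain : pvFirst cs (pvOG cs k) t = pvFirst cs (pvOG cs k) (i0+1) := by
          apply pvFirst_congr cs _ _ _ (by omega)
          intro u hu1 hu2
          by_cases hui : u = i0
          · subst hui
            have hkf : pvOcc cs k u = false := by simpa using hko
            unfold pvOG
            simp [hkf]
          · unfold pvOG
            rw [hnocclt u hu1 (by omega)]
            rfl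
        have hrnek : r ≠ k ∨ ¬ (1 ≤ (r:Int) ∧ (r:Int) ≤ 6 ∧ j < cs.length ∧ cs[j]? = some ' ') := by
          by_cases hrk : r = k
          · right
            rintro ⟨hx1, hx2, hx3, hx4⟩
            apply hko
            rw [pvOcc_iff]
            refine ⟨hnl3, fun dd hdd => ?_, ?_⟩
            · have := hr2 (i0 + 1 + dd) (by omega) (by omega)
              exact this
            · rw [← hrk, ← hjr]
              exact hx4
          · left; exact hrk
        -- whatever the guard does, the dictionary entry at k is unchanged
        set d2 := (if 1 ≤ ((r:Nat) : Int) ∧ ((r:Nat) : Int) ≤ 6 ∧ j < cs.length ∧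
              cs[j]? = some ' ' ∧ d.contains ((r:Nat) : Int) = false then
            (if PySem.List.slice cs (some ((j : Int) + 1))
                  (some (PySem.Chars.findFrom cs ['\n'] (j : Int) none)) ∈ pvIGN then d
             else d.insert ((r:Nat) : Int) (((i0 : Nat) : Int) + 1))
           else d) with hd2def
        have hd2 : d2.get? ((k:Nat) : Int) = d.get? ((k:Nat) : Int) := by
          rw [hd2def]
          split
          · rename_i hguard
            obtain ⟨hg1, hg2, hg3, hg4, hg5⟩ := hguard
            rcases hrnek with hrk | habs
            · split
              · rfl
              · exact PySem.Dict.get?_insert_of_ne d _ (by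
                  intro hc
                  exact hrk (by exact_mod_cast hc.symm))
            · exact absurd ⟨hg1, hg2, hg3, hg4⟩ habs
          · rfl
        rw [ih (i0+1) d2 (by omega) (by omega), hd2, hchain]

theorem pvKey_eq (cs : List Char) (k : Nat) (hk1 : 1 ≤ k) (hk6 : k ≤ 6) :
    pvWhileA cs (k : Int) (cs.length + 1) 0 =
      (pvLoopB cs (cs.length + 1) PySem.Dict.empty (PySem.Chars.find cs ['\n'])).get? (k : Int) := by
  rw [pvWhileA_eq cs k (cs.length + 1) 0 (by omega) (by simp)]
  have h0 := pvFindFrom_single cs '\n' 0 (by omega)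
  norm_num at h0
  have hfind : PySem.Chars.find cs ['\n'] =
      (match pvFirst cs (pvIsNl cs) 0 with | none => -1 | some i => ((i : Nat) : Int)) := h0
  rw [hfind, pvLoopB_eq cs (cs.length + 1) 0 PySem.Dict.empty (by omega) (by omega) k hk1 hk6]
  rw [PySem.Dict.get?_empty, Option.none_or]
  rfl

theorem pvForSizes_pick (cs : List Char) (firsts : PySem.Dict Int Int) :
    ∀ l : List Int, (∀ x ∈ l, pvWhileA cs x (cs.length + 1) 0 = firsts.get? x) →
      pvForSizes cs l = pvPick firsts l := by
  intro l h
  induction l with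
  | nil => rfl
  | cons x xs ih =>
    show (match pvWhileA cs x (cs.length + 1) 0 with
          | some v => v | none => pvForSizes cs xs) = _
    rw [h x (List.mem_cons_self)]
    show (match firsts.get? x with | some v => v | none => pvForSizes cs xs) = _
    cases hg : firsts.get? x with
    | some v =>
      show v = (match firsts.get? x with | some v => v | none => pvPick firsts xs)
      rw [hg]
    | none =>
      show pvForSizes cs xs = (match firsts.get? x with | some v => v | none => pvPick firsts xs)
      rw [hg]
      exact ih (fun y hy => h y (List.mem_cons_of_mem x hy))



-- ===== VERDICT (by name: the statement is the Claim_ definition above) =====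
theorem find_title_spec : Claim_equal_find_title := by
  intro markdown _hdom
  unfold Spec_find_title find_title find_title_alt
  show pvForSizes markdown.toList (PySem.List.pyRange 1 7 1) =
    pvPick (pvLoopB markdown.toList (markdown.toList.length + 1) PySem.Dict.empty
      (PySem.Chars.find markdown.toList ['\n'])) (PySem.List.pyRange 1 7 1)
  have hrange : PySem.List.pyRange 1 7 1 = [1, 2, 3, 4, 5, 6] := by decide
  rw [hrange]
  apply pvForSizes_pick
  intro x hx
  fin_cases hx
  · simpa using pvKey_eq markdown.toList 1 (by omega) (by omega)
  · simpa using pvKey_eq markdown.toList 2 (by omega) (by omega)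
  · simpa using pvKey_eq markdown.toList 3 (by omega) (by omega)
  · simpa using pvKey_eq markdown.toList 4 (by omega) (by omega)
  · simpa using pvKey_eq markdown.toList 5 (by omega) (by omega)
  · simpa using pvKey_eq markdown.toList 6 (by omega) (by omega)
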